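-- pv_equiv track=rewrite | github.com/xingzhicn/MyLeetCode | misc/my_queue.py | bar
-- ===== SOURCE A (Python) =====
-- def bar(input_queue: list):
--     """
--     “输入队列是[1,2,3,4]，按照如下步骤输出队列：
--     1.将输入头部元素移到输出队列的尾部
--     2.将输入头部元素移到输入队列尾部，重复1-2步骤直到没有输入队列为空，根据输出队列还原输入队列”
--     """
--     result = []
--     for i in range(len(input_queue)):
--         # 将输入队列尾部放到输入头部元素
--         if result:
--             tmp1 = result.pop()
--             result.insert(0, tmp1)
--         # 将输出尾部元素移到输入队列的头部
--         tmp = input_queue.pop()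
--         result.insert(0, tmp)
--
--     return result
-- ===== SOURCE B (Python) =====
-- def bar(input_queue: list):
--     n = len(input_queue)
--     result = [None] * n
--     positions = list(range(n))
--     while input_queue:
--         val = input_queue.pop(0)
--         pos = positions.pop(0)
--         result[pos] = val
--         if positions:
--             positions.append(positions.pop(0))
--     return result
-- ===== Notes on version B (the rewrite author's own statement) =====
-- stated objective: alternative
-- what changed: B replaces A's backward loop (pop input from the end, rotate the partial result's last element to the front, prepend) by a forward game simulation: it precomputes a rotating queue of slot indices and assigns each value, consumed front-to-back, into its precomputed slot of a preallocated result list.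
import Mathlib
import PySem

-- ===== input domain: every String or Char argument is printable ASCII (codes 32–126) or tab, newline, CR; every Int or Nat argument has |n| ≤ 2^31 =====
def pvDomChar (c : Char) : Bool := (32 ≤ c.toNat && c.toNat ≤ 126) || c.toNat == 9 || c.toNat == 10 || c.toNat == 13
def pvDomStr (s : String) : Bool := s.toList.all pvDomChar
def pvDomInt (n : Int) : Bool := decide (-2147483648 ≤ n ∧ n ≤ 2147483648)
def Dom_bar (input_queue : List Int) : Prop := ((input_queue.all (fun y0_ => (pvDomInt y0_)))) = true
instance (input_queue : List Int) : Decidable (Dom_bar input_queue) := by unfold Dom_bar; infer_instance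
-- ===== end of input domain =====

-- B replaces A's backward rotate-and-prepend reconstruction by a forward game simulation that
-- assigns each value into a precomputed slot taken from a rotating position queue (objective:
-- alternative algorithm, similar cost). Both Pythons empty the argument list in place; the
-- equivalence proved here is about the RETURN value (the final mutated state coincides anyway).

-- ===== PORT A =====
-- `result.pop(); result.insert(0, tmp1)` on a nonempty list: last element moved to the front
def rotA (r : List Int) : List Int :=
  match r.getLast? with
  | some t => t :: r.dropLast
  | none => r

-- the `for i in range(len(input_queue))` loop; each pass pops input_queue's last element
def barLoop : Nat → List Int → List Int → List Int
  | 0, _, res => res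
  | k + 1, inp, res =>
    let res1 := if res.isEmpty then res else rotA res
    match inp.getLast? with
    | some tmp => barLoop k inp.dropLast (tmp :: res1)
    | none => res1   -- unreachable: the loop runs exactly inp.length times

def bar (input_queue : List Int) : List Int :=
  barLoop input_queue.length input_queue []

-- ===== PORT B =====
-- `positions.append(positions.pop(0))` (guarded by `if positions:`)
def posRot (ps : List Nat) : List Nat :=
  match ps with
  | [] => []
  | q :: rest => rest ++ [q]

-- the `while input_queue:` loop: consume values front-to-back, assign into rotating slots
def barAltLoop : List Int → List Nat → List Int → List Int
  | [], _, res => res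
  | _ :: _, [], res => res   -- unreachable: positions and values have equal length
  | v :: vs, p :: ps, res => barAltLoop vs (posRot ps) (res.set p v)

def bar_alt (input_queue : List Int) : List Int :=
  barAltLoop input_queue (List.range input_queue.length)
    (List.replicate input_queue.length 0)

-- ===== PRECONDITION & SPEC =====
def Spec_bar (input_queue : List Int) (out : List Int) : Prop := out = bar_alt input_queue
instance (input_queue : List Int) (out : List Int) : Decidable (Spec_bar input_queue out) := by unfold Spec_bar; infer_instance

-- ===== CLAIM (what is proved, stated in full; the proofs are below) =====
def Claim_equal_bar : Prop := ∀ (input_queue : List Int), Dom_bar input_queue → Spec_bar input_queue (bar input_queue)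

-- ===== LEMMAS AND PROOFS =====

-- ---- A side: bar satisfies the head recurrence bar (v :: vs) = v :: rotA (bar vs) ----

theorem barLoop_eq_foldl (inp : List Int) : ∀ res,
    barLoop inp.length inp res = List.foldl (fun r w => w :: rotA r) res inp.reverse := by
  induction inp using List.reverseRecOn with
  | nil => intro res; simp [barLoop]
  | append_singleton ys a ih =>
    intro res
    have h1 : (ys ++ [a]).length = ys.length + 1 := by simp
    rw [h1]
    simp only [barLoop, List.getLast?_concat, List.dropLast_concat, List.reverse_append,
      List.reverse_singleton, List.singleton_append, List.foldl_cons]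
    rw [ih]
    congr 1
    cases res <;> simp [rotA]

theorem bar_cons (v : Int) (vs : List Int) : bar (v :: vs) = v :: rotA (bar vs) := by
  unfold bar
  rw [barLoop_eq_foldl, barLoop_eq_foldl]
  have : (v :: vs).reverse = vs.reverse ++ [v] := by simp
  rw [this, List.foldl_append]
  simp

-- ---- B side: assignment-list characterisation ----

-- the (slot, value) pairs the B loop writes, in order
def assign : List Int → List Nat → List (Nat × Int)
  | [], _ => []
  | _ :: _, [] => []
  | v :: vs, p :: ps => (p, v) :: assign vs (posRot ps)

def applyAll (res : List Int) (S : List (Nat × Int)) : List Int :=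
  S.foldl (fun r pv => r.set pv.1 pv.2) res

theorem barAltLoop_eq_applyAll (vs : List Int) : ∀ ps res,
    barAltLoop vs ps res = applyAll res (assign vs ps) := by
  induction vs with
  | nil => intro ps res; cases ps <;> simp [barAltLoop, assign, applyAll]
  | cons v vs ih =>
    intro ps res
    cases ps with
    | nil => simp [barAltLoop, assign, applyAll]
    | cons p ps => simp [barAltLoop, assign, applyAll, ih]

theorem length_applyAll (S : List (Nat × Int)) : ∀ res, (applyAll res S).length = res.length := by
  induction S with
  | nil => intro res; simp [applyAll]
  | cons pv S ih => intro res; simp [applyAll] at ih ⊢; rw [ih]; simp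

theorem mem_posRot {p : Nat} {ps : List Nat} (h : p ∈ posRot ps) : p ∈ ps := by
  cases ps with
  | nil => simpa [posRot] using h
  | cons q rest => simp [posRot] at h; rcases h with h | h <;> simp [h]

theorem assign_pos_mem (vs : List Int) : ∀ ps p w, (p, w) ∈ assign vs ps → p ∈ ps := by
  induction vs with
  | nil => intro ps p w h; simp [assign] at h
  | cons v vs ih =>
    intro ps p w h
    cases ps with
    | nil => simp [assign] at h
    | cons q rest =>
      simp [assign] at h
      rcases h with ⟨h1, _⟩ | h
      · simp [h1]
      · exact List.mem_cons_of_mem _ (mem_posRot (ih _ _ _ h))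

theorem posRot_map (φ : Nat → Nat) (ps : List Nat) :
    posRot (ps.map φ) = (posRot ps).map φ := by
  cases ps <;> simp [posRot]

theorem assign_map (φ : Nat → Nat) (vs : List Int) : ∀ ps,
    assign vs (ps.map φ) = (assign vs ps).map (fun pv => (φ pv.1, pv.2)) := by
  induction vs with
  | nil => intro ps; cases ps <;> simp [assign]
  | cons v vs ih =>
    intro ps
    cases ps with
    | nil => simp [assign]
    | cons p ps =>
      simp only [assign, List.map_cons]
      rw [posRot_map, ih]

-- untouched index: if no assignment targets i, applyAll leaves res[i]? unchanged
theorem applyAll_getElem?_untouched (S : List (Nat × Int)) : ∀ (res : List Int) (i : Nat),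
    (∀ pv ∈ S, pv.1 ≠ i) → (applyAll res S)[i]? = res[i]? := by
  induction S with
  | nil => intro res i _; rfl
  | cons pv S ih =>
    intro res i h
    have h1 : pv.1 ≠ i := h pv List.mem_cons_self
    have h2 : ∀ q ∈ S, q.1 ≠ i := fun q hq => h q (List.mem_cons_of_mem _ hq)
    show (applyAll (res.set pv.1 pv.2) S)[i]? = res[i]?
    rw [ih _ _ h2, List.getElem?_set_ne h1]

-- transport along an injective relabelling φ of the slots
theorem applyAll_map_getElem? (φ : Nat → Nat) (S : List (Nat × Int)) :
    ∀ (a b : List Int) (k : Nat), φ k < a.length → k < b.length → a[φ k]? = b[k]? →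
    (∀ pv ∈ S, φ pv.1 = φ k → pv.1 = k) →
    (applyAll a (S.map (fun pv => (φ pv.1, pv.2))))[φ k]? = (applyAll b S)[k]? := by
  induction S with
  | nil => intro a b k _ _ hab _; exact hab
  | cons pv S ih =>
    intro a b k ha hb hab hinj
    have hinj' : ∀ q ∈ S, φ q.1 = φ k → q.1 = k := fun q hq => hinj q (List.mem_cons_of_mem _ hq)
    show (applyAll (a.set (φ pv.1) pv.2) (S.map (fun pv => (φ pv.1, pv.2))))[φ k]?
        = (applyAll (b.set pv.1 pv.2) S)[k]?
    by_cases hpk : pv.1 = k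
    · exact ih (a.set (φ pv.1) pv.2) (b.set pv.1 pv.2) k (by simpa using ha)
        (by simpa using hb)
        (by rw [hpk, List.getElem?_set_self ha, List.getElem?_set_self hb])
        hinj'
    · have hφ : φ pv.1 ≠ φ k := fun h => hpk (hinj pv List.mem_cons_self h)
      exact ih (a.set (φ pv.1) pv.2) (b.set pv.1 pv.2) k (by simpa using ha)
        (by simpa using hb)
        (by rw [List.getElem?_set_ne hφ, List.getElem?_set_ne hpk, hab])
        hinj'

-- the slot relabelling produced by one step of B on a queue of m + 1 slots
def phi (m : Nat) (j : Nat) : Nat := if j + 1 = m then 1 else j + 2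

theorem posRot_succ_range (m' : Nat) :
    posRot ((List.range (m' + 1)).map (· + 1)) = (List.range (m' + 1)).map (phi (m' + 1)) := by
  have hfun : (fun x : Nat => Nat.succ x + 1) = (fun x : Nat => x + 2) := funext fun x => by omega
  have hL : (List.range (m' + 1)).map (· + 1) = 1 :: (List.range m').map (fun x => x + 2) := by
    rw [List.range_succ_eq_map, List.map_cons, List.map_map]
    simp only [Function.comp_def, hfun]
  have hR : (List.range (m' + 1)).map (phi (m' + 1))
      = (List.range m').map (phi (m' + 1)) ++ [1] := by
    rw [List.range_succ, List.map_append, List.map_singleton, phi, if_pos rfl]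
  rw [hL, hR]
  show (List.range m').map (fun x => x + 2) ++ [1] = (List.range m').map (phi (m' + 1)) ++ [1]
  congr 1
  refine List.map_congr_left fun j hj => ?_
  rw [List.mem_range] at hj
  simp only [phi]
  rw [if_neg (by omega)]

theorem bar_alt_cons (v : Int) (vs : List Int) :
    bar_alt (v :: vs) = v :: rotA (bar_alt vs) := by
  unfold bar_alt
  rw [barAltLoop_eq_applyAll, barAltLoop_eq_applyAll]
  cases vs with
  | nil => rfl
  | cons w ws =>
    set m := (w :: ws).length with hm
    have hpos : 1 ≤ m := by simp [hm]
    obtain ⟨m', hm'⟩ : ∃ m', m = m' + 1 := ⟨m - 1, by omega⟩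
    have hlen : (v :: w :: ws).length = m + 1 := by simp [hm]
    rw [hlen]
    have hsucc : ((List.range m).map Nat.succ) = (List.range m).map (· + 1) := by
      simp [Nat.succ_eq_add_one]
    have hassign : assign (v :: w :: ws) (List.range (m + 1))
        = (0, v) :: (assign (w :: ws) (List.range m)).map (fun pv => (phi m pv.1, pv.2)) := by
      rw [List.range_succ_eq_map]
      show (0, v) :: assign (w :: ws) (posRot ((List.range m).map Nat.succ)) = _
      rw [hsucc, hm', posRot_succ_range m', ← hm', assign_map]
    rw [hassign]
    set S := assign (w :: ws) (List.range m) with hS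
    have hposS : ∀ pv ∈ S, pv.1 < m := by
      intro pv hpv
      have := assign_pos_mem (w :: ws) (List.range m) pv.1 pv.2 hpv
      simpa [List.mem_range] using this
    set L := applyAll (List.replicate m 0) S with hL
    have hlenB : L.length = m := by rw [hL, length_applyAll]; simp
    have hLne : L ≠ [] := by intro h; rw [h] at hlenB; simp at hlenB; omega
    have hrot : rotA L = L.getLast hLne :: L.dropLast := by
      unfold rotA
      rw [List.getLast?_eq_some_getLast hLne]
    show applyAll ((List.replicate (m + 1) 0).set 0 v)
        (S.map (fun pv => (phi m pv.1, pv.2))) = v :: rotA L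
    apply List.ext_getElem?
    intro i
    rcases Nat.lt_or_ge i (m + 1) with hi | hi
    · rcases Nat.eq_zero_or_pos i with rfl | hi1
      · -- index 0: untouched by the mapped assignments (phi never yields 0)
        rw [applyAll_getElem?_untouched]
        · rw [List.getElem?_set_self (by simp)]
          rfl
        · intro pv hpv
          simp only [List.mem_map] at hpv
          obtain ⟨q, hq, rfl⟩ := hpv
          have := hposS q hq
          simp only [phi]
          split <;> omega
      · -- index i ∈ [1, m]: equals L at slot ψ i
        have hφk : i = phi m (if i = 1 then m - 1 else i - 2) := by
          by_cases h1 : i = 1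
          · rw [if_pos h1, h1]; simp only [phi]; rw [if_pos (by omega)]
          · rw [if_neg h1]; simp only [phi]; rw [if_neg (by omega)]; omega
        set k := if i = 1 then m - 1 else i - 2 with hk
        have hkm : k < m := by rw [hk]; split <;> omega
        have hlen1 : phi m k < ((List.replicate (m + 1) 0).set 0 v).length := by
          rw [← hφk]; simp only [List.length_set, List.length_replicate]; omega
        have hlen2 : k < (List.replicate m (0 : Int)).length := by
          simpa using hkm
        have hbase : ((List.replicate (m + 1) (0 : Int)).set 0 v)[phi m k]?
            = (List.replicate m (0 : Int))[k]? := by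
          rw [List.getElem?_set_ne (by rw [← hφk]; omega)]
          simp only [List.getElem?_replicate]
          rw [if_pos (by rw [← hφk]; omega), if_pos hkm]
        have hinjS : ∀ pv ∈ S, phi m pv.1 = phi m k → pv.1 = k := by
          intro pv hpv hφ
          have := hposS pv hpv
          simp only [phi] at hφ
          split at hφ <;> split at hφ <;> omega
        have key := applyAll_map_getElem? (phi m) S _ _ k hlen1 hlen2 hbase hinjS
        rw [hφk, key, ← hL, ← hφk, hrot]
        rcases Nat.eq_or_lt_of_le hi1 with h1 | h1
        · have hi1' : i = 1 := h1.symm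
          have hk' : k = m - 1 := by rw [hk, if_pos hi1']
          rw [hi1', hk']
          show L[m - 1]? = some (L.getLast hLne)
          rw [List.getLast_eq_getElem, List.getElem?_eq_getElem (by omega)]
          simp [hlenB]
        · have hk' : k = i - 2 := by rw [hk, if_neg (by omega)]
          have h2 : 2 ≤ i := h1
          obtain ⟨j, rfl⟩ := Nat.exists_eq_add_of_le h2
          have hcons : (v :: (L.getLast hLne :: L.dropLast))[2 + j]? = L.dropLast[j]? := by
            simp [Nat.add_comm 2 j]
          rw [hcons, hk', List.getElem?_dropLast]
          have hj : 2 + j - 2 = j := by omega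
          rw [hj, hlenB]
          rcases Nat.lt_or_ge j (m - 1) with hlt | hge
          · rw [if_pos hlt]
          · rw [if_neg (by omega), List.getElem?_eq_none (by omega)]
    · -- beyond both lengths
      rw [List.getElem?_eq_none, List.getElem?_eq_none]
      · simp only [List.length_cons, hrot, List.length_dropLast, hlenB]; omega
      · rw [length_applyAll]; simp; omega

-- ===== VERDICT (by name: the statement is the Claim_ definition above) =====
theorem bar_eq_bar_alt (x : List Int) : bar x = bar_alt x := by
  induction x with
  | nil => rfl
  | cons v vs ih => rw [bar_cons, bar_alt_cons, ih]

theorem bar_spec : Claim_equal_bar := by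
  intro input_queue _
  exact bar_eq_bar_alt input_queue
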